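-- pv_equiv track=rewrite | github.com/aglow123/JBAD | tautology/expressions.py | letters_values
-- ===== SOURCE A (Python) =====
-- import collections
-- import itertools
--
-- def gen(x):
--     combinations = list(itertools.product([0, 1], repeat=x))
--     for comb in combinations:
--         yield comb
--
-- def letters_values(w):
--     num_of_letters = 0
--     letters = collections.defaultdict(int)
--     for i in range(len(w)):
--         if w[i].islower() and w[i] not in w[:i]:
--             num_of_letters += 1
--             letters[w[i]] = 0
--     for comb in gen(num_of_letters):
--         i = 0
--         for letter in list(letters.keys()):
--             letters[letter] = comb[i]
--             i += 1
--         yield letters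
-- ===== SOURCE B (Python) =====
-- import collections
--
-- def letters_values(w):
--     letters = collections.defaultdict(int)
--     seen = set()
--     for ch in w:
--         if ch.islower() and ch not in seen:
--             seen.add(ch)
--             letters[ch] = 0
--     keys = list(letters)
--
--     def rec(i):
--         if i == len(keys):
--             yield letters
--         else:
--             letters[keys[i]] = 0
--             yield from rec(i + 1)
--             letters[keys[i]] = 1
--             yield from rec(i + 1)
--
--     yield from rec(0)
-- ===== Notes on version B (the rewrite author's own statement) =====
-- stated objective: faster
-- what changed: B collects the distinct lowercase letters with an O(1) seen-set instead of A's O(i) prefix substring scan per character, and enumerates the assignments with a recursive generator over the key list (set key to 0, recurse, set to 1, recurse) instead of materialising the full itertools.product table.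
import Mathlib
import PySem

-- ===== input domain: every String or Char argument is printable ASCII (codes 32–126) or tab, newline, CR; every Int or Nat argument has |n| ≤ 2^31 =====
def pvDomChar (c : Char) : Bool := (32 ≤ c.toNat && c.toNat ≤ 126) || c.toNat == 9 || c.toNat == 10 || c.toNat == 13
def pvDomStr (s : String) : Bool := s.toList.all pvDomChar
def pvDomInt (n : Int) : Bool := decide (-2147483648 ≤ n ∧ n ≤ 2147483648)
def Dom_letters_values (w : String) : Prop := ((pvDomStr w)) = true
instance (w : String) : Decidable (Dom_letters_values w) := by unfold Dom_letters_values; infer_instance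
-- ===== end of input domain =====

-- B replaces A's itertools.product table of bit tuples by a recursive generator over the ordered
-- key list (set the key to 0, recurse, set it to 1, recurse). Both Pythons yield ONE shared mutable
-- defaultdict once per assignment; the equivalence proved is about list(<generator>), in which every
-- element is a reference to that same dict — read, after exhaustion, as its final (all-ones) state.

-- ===== PORT A =====
-- list(itertools.product([0, 1], repeat=n)): result = [[]], then n times result = [c+[b] for c in result for b in [0, 1]]
def combsA : Nat → List (List Int)
  | 0 => [[]]
  | n + 1 => (combsA n).flatMap (fun c => [c ++ [0], c ++ [1]])

-- first loop of A: for i in range(len(w)): if w[i].islower() and w[i] not in w[:i]: num += 1; letters[w[i]] = 0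
-- (w[i].islower() on the 1-char string w[i] is PySem.Chars.islower of its char; 'w[i] not in w[:i]' is substring isIn)
def loopA (cs : List Char) (i : Nat) (num : Int) (d : PySem.Dict String Int) :
    Int × PySem.Dict String Int :=
  if h : i < cs.length then
    let c := cs[i]
    if PySem.Chars.islower c && !(PySem.Chars.isIn [c] (cs.take i)) then
      loopA cs (i + 1) (num + 1) (d.insert (String.ofList [c]) 0)
    else loopA cs (i + 1) num d
  else (num, d)
termination_by cs.length - i

-- i = 0; for letter in list(letters.keys()): letters[letter] = comb[i]; i += 1
def assignA (comb : List Int) (d : PySem.Dict String Int) : PySem.Dict String Int :=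
  (d.keys.foldl (fun s k => (s.1.insert k (PySem.List.pyGetD comb s.2 0), s.2 + 1))
    (d, (0 : Int))).1

-- for comb in gen(num_of_letters): assign, yield letters.  Every yield is a reference to the one
-- shared dict, so list() of the generator holds one entry per comb, all showing the final state.
def letters_values (w : String) : List (List (String × Int)) :=
  let cs := w.toList
  let r := loopA cs 0 0 PySem.Dict.empty
  let final := (combsA r.1.toNat).foldl (fun d comb => assignA comb d) r.2
  (combsA r.1.toNat).map (fun _ => final.items)

-- ===== PORT B =====
-- for ch in w: if ch.islower() and ch not in seen: seen.add(ch); letters[ch] = 0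
def loopB : List Char → PySem.Set String → PySem.Dict String Int →
    PySem.Set String × PySem.Dict String Int
  | [], seen, d => (seen, d)
  | c :: rest, seen, d =>
    if PySem.Chars.islower c && !(PySem.Set.contains seen (String.ofList [c])) then
      loopB rest (seen.add (String.ofList [c])) (d.insert (String.ofList [c]) 0)
    else loopB rest seen d

-- rec(i): at i == len(keys) yield the dict; else set keys[i] to 0, recurse, set it to 1, recurse.
-- Snapshots accumulate in the first component, the mutated dict is threaded in the second.
-- (the guard is 'keys.length ≤ i' instead of '=' only for termination; i never exceeds keys.length)
def recB (keys : List String) (i : Nat) (letters : PySem.Dict String Int) :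
    List (List (String × Int)) × PySem.Dict String Int :=
  if keys.length ≤ i then ([letters.items], letters)
  else
    let k := keys.getD i ""
    let r0 := recB keys (i + 1) (letters.insert k 0)
    let r1 := recB keys (i + 1) (r0.2.insert k 1)
    (r0.1 ++ r1.1, r1.2)
termination_by keys.length - i

-- as in A, every yield is a reference to the one shared dict: one list entry per yield of rec,
-- all showing the dict's final state after the recursion finished
def letters_values_alt (w : String) : List (List (String × Int)) :=
  let r := loopB w.toList PySem.Set.empty PySem.Dict.empty
  let res := recB r.2.keys 0 r.2
  res.1.map (fun _ => res.2.items)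

-- ===== PRECONDITION & SPEC =====
def Spec_letters_values (w : String) (out : List (List (String × Int))) : Prop := out = letters_values_alt w
instance (w : String) (out : List (List (String × Int))) : Decidable (Spec_letters_values w out) := by unfold Spec_letters_values; infer_instance

-- ===== CLAIM (what is proved, stated in full; the proofs are below) =====
def Claim_equal_letters_values : Prop := ∀ (w : String), Dom_letters_values w → Spec_letters_values w (letters_values w)

-- ===== LEMMAS AND PROOFS =====

-- all 0/1 assignments over the ordered key list, 0 before 1, leftmost key varying slowest
def P : List String → List (List (String × Int))
  | [] => [[]]
  | k :: ks => (P ks).map (fun a => (k, 0) :: a) ++ (P ks).map (fun a => (k, 1) :: a)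

lemma zip_map_self {α β : Type} (f : α → β) :
    ∀ l : List α, l.zip (l.map f) = l.map (fun a => (a, f a)) := by
  intro l; induction l with
  | nil => rfl
  | cons x t ih => simp [ih]

lemma ofList_single_inj (c c' : Char) : String.ofList [c'] = String.ofList [c] ↔ c' = c := by
  constructor
  · intro h; have := congrArg String.toList h; simpa using this
  · intro h; rw [h]

lemma combsA_succ (n : Nat) :
    combsA (n + 1) = (combsA n).map (fun c => 0 :: c) ++ (combsA n).map (fun c => 1 :: c) := by
  induction n with
  | zero => rfl
  | succ m ih =>
    calc combsA (m + 2)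
        = ((combsA m).map (fun c => 0 :: c) ++ (combsA m).map (fun c => 1 :: c)).flatMap
            (fun c => [c ++ [0], c ++ [1]]) := by
            rw [show combsA (m+2) = (combsA (m+1)).flatMap (fun c => [c ++ [0], c ++ [1]]) from rfl, ih]
      _ = (combsA m).flatMap (fun a => List.map (fun c => 0 :: c) [a ++ [0], a ++ [1]]) ++
          (combsA m).flatMap (fun a => List.map (fun c => 1 :: c) [a ++ [0], a ++ [1]]) := by
            simp [List.flatMap_append, List.flatMap_map]
      _ = ((combsA m).flatMap (fun c => [c ++ [0], c ++ [1]])).map (fun c => 0 :: c) ++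
          ((combsA m).flatMap (fun c => [c ++ [0], c ++ [1]])).map (fun c => 1 :: c) := by
            rw [List.map_flatMap, List.map_flatMap]
      _ = (combsA (m + 1)).map (fun c => 0 :: c) ++ (combsA (m + 1)).map (fun c => 1 :: c) := rfl

lemma length_mem_combsA : ∀ (n : Nat) (c : List Int), c ∈ combsA n → c.length = n := by
  intro n
  induction n with
  | zero => intro c hc; simp [combsA] at hc; simp [hc]
  | succ m ih =>
    intro c hc
    simp only [combsA, List.mem_flatMap] at hc
    obtain ⟨a, ha, hc⟩ := hc
    have := ih a ha
    simp at hc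
    rcases hc with h | h <;> subst h <;> simp [this]

lemma insert_middle (pre suf : List (String × Int)) (k : String) (v v0 : Int)
    (hpre : ∀ p ∈ pre, p.1 ≠ k) (hsuf : ∀ p ∈ suf, p.1 ≠ k) :
    (PySem.Dict.mk (pre ++ (k, v0) :: suf)).insert k v = PySem.Dict.mk (pre ++ (k, v) :: suf) := by
  have hc : (PySem.Dict.mk (pre ++ (k, v0) :: suf)).contains k = true := by
    simp [PySem.Dict.contains_mk]
  apply PySem.Dict.ext
  rw [PySem.Dict.items_insert_of_contains _ _ hc]
  show (pre ++ (k, v0) :: suf).map _ = pre ++ (k, v) :: suf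
  simp only [List.map_append, List.map_cons]
  congr 1
  · conv_rhs => rw [← List.map_id pre]
    apply List.map_congr_left; intro p hp; simp [hpre p hp]
  · simp only [beq_self_eq_true, if_pos]
    congr 1
    conv_rhs => rw [← List.map_id suf]
    apply List.map_congr_left; intro p hp; simp [hsuf p hp]

lemma insert_fresh (l : List (String × Int)) (k : String) (v : Int)
    (h : ∀ p ∈ l, p.1 ≠ k) :
    (PySem.Dict.mk l).insert k v = PySem.Dict.mk (l ++ [(k, v)]) := by
  have hc : (PySem.Dict.mk l).contains k = false := by
    simp only [PySem.Dict.contains_mk, List.any_eq_false]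
    intro p hp
    simp [h p hp]
  apply PySem.Dict.ext
  rw [PySem.Dict.items_insert_of_not_contains _ _ hc]

lemma assign_items (comb : List Int) : ∀ (ks : List String) (pre suf : List (String × Int))
    (done vals : List Int),
    comb = done ++ vals → suf.map Prod.fst = ks → (pre.map Prod.fst ++ ks).Nodup →
    vals.length = ks.length →
    (ks.foldl (fun s k => (s.1.insert k (PySem.List.pyGetD comb s.2 0), s.2 + 1))
        (PySem.Dict.mk (pre ++ suf), (done.length : Int))).1 =
      PySem.Dict.mk (pre ++ ks.zip vals) := by
  intro ks
  induction ks with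
  | nil =>
    intro pre suf done vals hcomb hsuf hnd hlen
    have : suf = [] := by simpa using congrArg List.length hsuf
    have hv : vals = [] := List.length_eq_zero_iff.mp hlen
    subst this; subst hv
    simp
  | cons k kt ih =>
    intro pre suf done vals hcomb hsuf hnd hlen
    cases suf with
    | nil => simp at hsuf
    | cons p st =>
    obtain ⟨k', v0⟩ := p
    simp only [List.map_cons, List.cons.injEq] at hsuf
    obtain ⟨hk', hst⟩ := hsuf
    subst hk'
    cases vals with
    | nil => simp at hlen
    | cons v vt =>
    simp only [List.length_cons, Nat.add_right_cancel_iff] at hlen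
    have hget : PySem.List.pyGetD comb (done.length : Int) 0 = v := by
      subst hcomb
      rw [PySem.List.pyGetD_natCast]
      simp
    have hnd' := hnd
    simp only [List.nodup_append, List.nodup_cons] at hnd'
    have hk_pre : ∀ p ∈ pre, p.1 ≠ k' := by
      intro p hp he
      exact hnd'.2.2 p.1 (List.mem_map_of_mem hp) k' (List.mem_cons_self ..) he
    have hk_st : ∀ p ∈ st, p.1 ≠ k' := by
      intro p hp he
      exact hnd'.2.1.1 (he ▸ (hst ▸ List.mem_map_of_mem hp))
    rw [List.foldl_cons]
    simp only [hget]
    rw [insert_middle pre st k' v v0 hk_pre hk_st]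
    have hstep : ((done.length : Int) + 1) = (((done ++ [v]).length : Nat) : Int) := by
      simp
    rw [show pre ++ (k', v) :: st = (pre ++ [(k', v)]) ++ st by simp]
    rw [hstep]
    rw [ih (pre ++ [(k', v)]) st (done ++ [v]) vt (by simp [hcomb]) hst
      (by simpa using hnd) hlen]
    simp

lemma assignA_eq (comb : List Int) (ks : List String) (vals : List Int)
    (hnd : ks.Nodup) (hlen : vals.length = ks.length) (hc : comb.length = ks.length) :
    assignA comb (PySem.Dict.mk (ks.zip vals)) = PySem.Dict.mk (ks.zip comb) := by
  unfold assignA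
  have hkeys : (PySem.Dict.mk (ks.zip vals)).keys = ks := by
    show (ks.zip vals).map Prod.fst = ks
    exact List.map_fst_zip (le_of_eq hlen.symm)
  rw [hkeys]
  have h := assign_items comb ks [] (ks.zip vals) [] comb rfl
    (List.map_fst_zip (le_of_eq hlen.symm)) (by simpa using hnd) hc
  simpa using h

lemma recB_eq : ∀ (n : Nat) (suf : List (String × Int)) (keys : List String) (i : Nat)
    (pre : List (String × Int)),
    suf.length = n →
    keys.Nodup → pre.map Prod.fst = keys.take i → suf.map Prod.fst = keys.drop i →
    recB keys i (PySem.Dict.mk (pre ++ suf)) =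
      ((P (keys.drop i)).map (fun asn => pre ++ asn),
        PySem.Dict.mk (pre ++ suf.map (fun p => (p.1, (1 : Int))))) := by
  intro n
  induction n with
  | zero =>
    intro suf keys i pre hlen hnd hpre hdrop
    have hsuf : suf = [] := List.length_eq_zero_iff.mp hlen
    subst hsuf
    have hd : keys.drop i = [] := by simpa using hdrop.symm
    have hle : keys.length ≤ i := List.drop_eq_nil_iff.mp hd
    rw [recB, if_pos hle, hd]
    simp [P]
  | succ m ih =>
    intro suf keys i pre hlen hnd hpre hdrop
    cases suf with
    | nil => simp at hlen
    | cons q st =>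
    obtain ⟨k0, v0⟩ := q
    simp only [List.length_cons, Nat.add_right_cancel_iff] at hlen
    have hlt : i < keys.length := by
      by_contra h
      rw [List.drop_eq_nil_iff.mpr (by omega)] at hdrop
      simp at hdrop
    have hget? : keys[i]? = some k0 := by
      have : (List.drop i keys).head? = keys[i]? := List.head?_drop
      rw [← hdrop] at this
      simpa using this.symm
    have hgetD : keys.getD i "" = k0 := by
      rw [List.getD_eq_getElem?_getD, hget?]; rfl
    have hdrop1 : st.map Prod.fst = keys.drop (i + 1) := by
      have : keys.drop (i + 1) = (keys.drop i).tail := by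
        rw [← List.drop_drop, List.drop_one]
      rw [this, ← hdrop]; rfl
    have htake1 : keys.take (i + 1) = keys.take i ++ [k0] := by
      rw [List.take_add_one, hget?]; rfl
    -- nodup pieces
    have hndk : (keys.take i ++ keys.drop i).Nodup := by
      rw [List.take_append_drop]; exact hnd
    simp only [← hdrop, ← hpre, List.map_cons, List.nodup_append, List.nodup_cons] at hndk
    have hk_pre : ∀ p ∈ pre, p.1 ≠ k0 := by
      intro p hp he
      exact hndk.2.2 p.1 (List.mem_map_of_mem hp) k0 (List.mem_cons_self ..) he
    have hk_st : ∀ p ∈ st, p.1 ≠ k0 := by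
      intro p hp he
      exact hndk.2.1.1 (he ▸ List.mem_map_of_mem hp)
    have hk_st1 : ∀ p ∈ st.map (fun p => (p.1, (1 : Int))), p.1 ≠ k0 := by
      intro p hp he
      simp only [List.mem_map] at hp
      obtain ⟨q, hq, rfl⟩ := hp
      exact hk_st q hq he
    rw [recB, if_neg (by omega)]
    simp only [hgetD]
    rw [show pre ++ (k0, v0) :: st = pre ++ (k0, v0) :: st from rfl]
    rw [insert_middle pre st k0 0 v0 hk_pre hk_st]
    have h0 : PySem.Dict.mk (pre ++ (k0, (0:Int)) :: st) = PySem.Dict.mk ((pre ++ [(k0, (0:Int))]) ++ st) := by simp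
    rw [h0, ih st keys (i + 1) (pre ++ [(k0, 0)]) hlen hnd (by simp [htake1, ← hpre]) hdrop1]
    simp only
    rw [show (pre ++ [(k0, (0:Int))]) ++ st.map (fun p => (p.1, (1:Int))) = pre ++ (k0, (0:Int)) :: st.map (fun p => (p.1, (1:Int))) by simp]
    rw [insert_middle pre (st.map (fun p => (p.1, (1:Int)))) k0 1 0 hk_pre hk_st1]
    rw [show pre ++ (k0, (1:Int)) :: st.map (fun p => (p.1, (1:Int))) = (pre ++ [(k0, (1:Int))]) ++ st.map (fun p => (p.1, (1:Int))) by simp]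
    rw [ih (st.map (fun p => (p.1, (1:Int)))) keys (i + 1) (pre ++ [(k0, 1)]) (by simp [hlen]) hnd (by simp [htake1, ← hpre]) (by simp only [List.map_map]; simpa using hdrop1)]
    rw [← hdrop]
    simp only [List.map_cons, P, List.map_map, List.map_append, ← hdrop1]
    simp [Function.comp_def]

lemma loop_eq : ∀ (suffix pre : List Char) (seen : PySem.Set String) (ks : List String),
    (∀ c : Char, PySem.Chars.islower c = true →
        PySem.Set.contains seen (String.ofList [c]) = pre.contains c) →
    ks.Nodup →
    (∀ k ∈ ks, PySem.Set.contains seen k = true) →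
    ∃ ks' : List String, ks'.Nodup ∧
      loopA (pre ++ suffix) pre.length (ks.length : Int)
          (PySem.Dict.mk (ks.map (fun k => (k, (0 : Int))))) =
        ((ks'.length : Int), PySem.Dict.mk (ks'.map (fun k => (k, (0 : Int))))) ∧
      (loopB suffix seen (PySem.Dict.mk (ks.map (fun k => (k, (0 : Int)))))).2 =
        PySem.Dict.mk (ks'.map (fun k => (k, (0 : Int)))) := by
  intro suffix
  induction suffix with
  | nil =>
    intro pre seen ks hseen hnd hsub
    refine ⟨ks, hnd, ?_, rfl⟩
    rw [loopA]
    simp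
  | cons c rest ih =>
    intro pre seen ks hseen hnd hsub
    have hlt : pre.length < (pre ++ c :: rest).length := by simp
    have hget : (pre ++ c :: rest)[pre.length]'hlt = c := by
      rw [List.getElem_append_right (le_refl pre.length)]
      simp
    have htake : (pre ++ c :: rest).take pre.length = pre := List.take_left
    have hisin : PySem.Chars.isIn [c] pre = pre.contains c := by
      by_cases hm : c ∈ pre
      · rw [(PySem.Chars.isIn_iff_infix [c] pre).mpr ((List.singleton_infix_iff c pre).mpr hm)]
        simp [hm]
      · have : ¬ ([c] <:+: pre) := fun h => hm ((List.singleton_infix_iff c pre).mp h)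
        rw [(PySem.Chars.isIn_eq_false_iff [c] pre).mpr this]
        simp [hm]
    have hcond : (PySem.Chars.islower c && !(PySem.Chars.isIn [c] pre))
        = (PySem.Chars.islower c && !(PySem.Set.contains seen (String.ofList [c]))) := by
      by_cases hl : PySem.Chars.islower c = true
      · rw [hl, hisin, hseen c hl]
      · simp only [Bool.not_eq_true] at hl
        rw [hl]; simp
    rw [loopA, dif_pos hlt]
    simp only [hget, htake, hcond]
    rw [loopB]
    by_cases hc : (PySem.Chars.islower c && !(PySem.Set.contains seen (String.ofList [c]))) = true
    · rw [if_pos hc, if_pos hc]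
      simp only [Bool.and_eq_true, Bool.not_eq_true'] at hc
      obtain ⟨hlc, hsc⟩ := hc
      have hfresh : ∀ p ∈ ks.map (fun k => (k, (0:Int))), p.1 ≠ String.ofList [c] := by
        intro p hp he
        simp only [List.mem_map] at hp
        obtain ⟨k, hk, rfl⟩ := hp
        simp only at he
        have := hsub k hk
        rw [he, hsc] at this
        exact absurd this (by simp)
      rw [insert_fresh _ _ _ hfresh]
      have hmk : (ks.map (fun k => (k, (0:Int)))) ++ [(String.ofList [c], 0)]
          = (ks ++ [String.ofList [c]]).map (fun k => (k, (0:Int))) := by simp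
      rw [hmk]
      have hpre' : pre ++ c :: rest = (pre ++ [c]) ++ rest := by simp
      have hlen' : pre.length + 1 = (pre ++ [c]).length := by simp
      have hnum : (ks.length : Int) + 1 = ((ks ++ [String.ofList [c]]).length : Int) := by
        simp
      rw [hpre', hlen', hnum]
      have hnew : String.ofList [c] ∉ ks := by
        intro hmem
        have := hsub _ hmem
        rw [hsc] at this
        exact absurd this (by simp)
      refine ih (pre ++ [c]) (seen.add (String.ofList [c])) (ks ++ [String.ofList [c]]) ?_ ?_ ?_
      · intro c' hl'
        rw [Bool.eq_iff_iff]
        rw [PySem.Set.contains_iff, PySem.Set.mem_add]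
        constructor
        · intro h
          rcases h with h | h
          · rw [← PySem.Set.contains_iff, hseen c' hl'] at h
            simp only [List.contains_eq_mem, decide_eq_true_eq] at h ⊢
            simp [h]
          · rw [ofList_single_inj] at h
            subst h
            simp
        · intro h
          simp only [List.contains_eq_mem, List.mem_append, List.mem_cons,
            decide_eq_true_eq] at h
          rcases h with h | h
          · left; rw [← PySem.Set.contains_iff, hseen c' hl']
            simp [h]
          · right
            rw [ofList_single_inj]
            simpa using h
      · simp only [List.nodup_append, List.nodup_cons]
        refine ⟨hnd, by simp, ?_⟩
        intro a ha b hb he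
        simp only [List.mem_singleton] at hb
        subst hb; exact hnew (he ▸ ha)
      · intro k hk
        rw [PySem.Set.contains_iff, PySem.Set.mem_add]
        rcases List.mem_append.mp hk with h | h
        · left; rw [← PySem.Set.contains_iff]; exact hsub k h
        · right; simpa using h
    · rw [if_neg hc, if_neg hc]
      have hpre' : pre ++ c :: rest = (pre ++ [c]) ++ rest := by simp
      have hlen' : pre.length + 1 = (pre ++ [c]).length := by simp
      rw [hpre', hlen']
      refine ih (pre ++ [c]) seen ks ?_ hnd hsub
      intro c' hl'
      by_cases hcc : c' = c
      · subst hcc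
        simp only [hl', Bool.true_and, Bool.not_eq_true', Bool.not_eq_false] at hc
        rw [hc]
        simp [List.contains_eq_mem]
      · rw [hseen c' hl']
        simp only [List.contains_eq_mem, List.mem_append, List.mem_cons]
        simp [hcc]

lemma length_combsA (n : Nat) : (combsA n).length = 2 ^ n := by
  induction n with
  | zero => rfl
  | succ m ih => rw [combsA_succ]; simp [ih]; ring

lemma length_P : ∀ ks : List String, (P ks).length = 2 ^ ks.length := by
  intro ks
  induction ks with
  | nil => rfl
  | cons k kt ih => show ((P kt).map _ ++ (P kt).map _).length = _; simp [ih]; ring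

lemma combsA_getLast? (n : Nat) : (combsA n).getLast? = some (List.replicate n 1) := by
  induction n with
  | zero => rfl
  | succ m ih =>
    rw [combsA_succ]
    have hcne : combsA m ≠ [] := by
      intro h; rw [h] at ih; simp at ih
    have hne : (combsA m).map (fun c => (1 : Int) :: c) ≠ [] := by simpa using hcne
    rw [List.getLast?_append_of_ne_nil _ hne, List.getLast?_map, ih]
    simp [List.replicate_succ]

lemma foldl_assignA_final : ∀ (combs : List (List Int)) (ks : List String) (vals : List Int),
    ks.Nodup → vals.length = ks.length → (∀ c ∈ combs, c.length = ks.length) →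
    combs.foldl (fun d comb => assignA comb d) (PySem.Dict.mk (ks.zip vals)) =
      PySem.Dict.mk (ks.zip (combs.getLastD vals)) := by
  intro combs
  induction combs with
  | nil => intro ks vals _ _ _; rfl
  | cons c ct ih =>
    intro ks vals hnd hlen hall
    rw [List.foldl_cons, assignA_eq c ks vals hnd hlen (hall c (List.mem_cons_self ..))]
    rw [ih ks c hnd (hall c (List.mem_cons_self ..))
      (fun x hx => hall x (List.mem_cons_of_mem _ hx))]
    rw [List.getLastD_cons]

-- ===== VERDICT (by name: the statement is the Claim_ definition above) =====

theorem letters_values_spec : Claim_equal_letters_values := by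
  intro w _
  unfold Spec_letters_values letters_values letters_values_alt
  simp only
  have h1 : ∀ c : Char, PySem.Chars.islower c = true →
      PySem.Set.contains PySem.Set.empty (String.ofList [c]) = ([] : List Char).contains c := by
    intro c _; rfl
  obtain ⟨ks', hnd, hA, hB⟩ :=
    loop_eq w.toList [] PySem.Set.empty [] h1 List.nodup_nil (by intro k hk; simp at hk)
  simp only [List.nil_append, List.length_nil, Nat.cast_zero, List.map_nil] at hA hB
  rw [show PySem.Dict.empty = PySem.Dict.mk ([] : List (String × Int)) from rfl]
  rw [hA, hB]
  simp only [Int.toNat_natCast]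
  have hzip : ks'.map (fun k => (k, (0 : Int))) = ks'.zip (ks'.map (fun _ => (0 : Int))) := by
    rw [zip_map_self]
  -- A side: the final dict after all assignments
  rw [hzip]
  rw [foldl_assignA_final (combsA ks'.length) ks' (ks'.map (fun _ => (0 : Int))) hnd (by simp)
    (length_mem_combsA ks'.length)]
  have hlast : (combsA ks'.length).getLastD (ks'.map (fun _ => (0 : Int)))
      = List.replicate ks'.length 1 := by
    rw [List.getLastD_eq_getLast?, combsA_getLast? ks'.length]
    rfl
  rw [hlast]
  have hones : ks'.zip (List.replicate ks'.length (1 : Int)) = ks'.map (fun k => (k, (1 : Int))) := by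
    rw [← List.map_const', zip_map_self]
  rw [hones]
  -- B side: recB's snapshots and final dict
  have hkeys : (PySem.Dict.mk (ks'.zip (ks'.map (fun _ => (0 : Int))))).keys = ks' := by
    show (ks'.zip (ks'.map (fun _ => (0 : Int)))).map Prod.fst = ks'
    rw [← hzip]
    simp [Function.comp_def]
  rw [hkeys]
  rw [show PySem.Dict.mk (ks'.zip (ks'.map (fun _ => (0 : Int))))
      = PySem.Dict.mk ([] ++ ks'.map (fun k => (k, (0 : Int)))) by rw [hzip]; rfl]
  rw [recB_eq (ks'.map (fun k => (k, (0 : Int)))).length (ks'.map (fun k => (k, (0 : Int))))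
    ks' 0 [] rfl hnd (by simp) (by simp [Function.comp_def])]
  simp only [List.drop_zero, List.nil_append, List.map_map]
  -- both sides are constant maps of the same element; compare lengths
  rw [show ((fun _ : List (String × Int) =>
        List.map ((fun p : String × Int => (p.1, (1 : Int))) ∘ fun k => (k, (0 : Int))) ks')
        ∘ fun asn => asn)
      = (fun _ : List (String × Int) => List.map (fun k => (k, (1 : Int))) ks') from by
    funext x; simp]
  rw [List.map_const', List.map_const', length_combsA, length_P]
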